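-- pv_equiv track=rewrite | github.com/DPXJ/AI-MINE-quick_note_AI | src/core/hotkey.py | _normalize_hotkey
-- ===== SOURCE A (Python) =====
-- def _normalize_hotkey(hotkey: str) -> str:
--     """标准化快捷键格式"""
--     # 转换为小写
--     hotkey = hotkey.lower()
--
--     # 替换常见别名
--     hotkey = hotkey.replace("ctrl", "control")
--     hotkey = hotkey.replace("win", "cmd")
--
--     # 分割并排序（保证一致性）
--     parts = hotkey.split('+')
--     parts = [p.strip() for p in parts]
--
--     # 修饰键在前，普通键在后
--     modifiers = []
--     keys = []
--
--     for part in parts: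
--         if part in ['control', 'ctrl', 'shift', 'alt', 'cmd']:
--             if part == 'ctrl':
--                 part = 'control'
--             modifiers.append(part)
--         else:
--             keys.append(part)
--
--     # 修饰键排序
--     modifier_order = {'control': 0, 'shift': 1, 'alt': 2, 'cmd': 3}
--     modifiers.sort(key=lambda x: modifier_order.get(x, 99))
--
--     return '+'.join(modifiers + keys)
-- ===== SOURCE B (Python) =====
-- def _normalize_hotkey(hotkey: str) -> str:
--     """Normalize a hotkey string without sorting: bucket-count the modifiers."""
--     hotkey = hotkey.lower().replace("ctrl", "control").replace("win", "cmd")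
--     parts = [p.strip() for p in hotkey.split('+')]
--     # accept the 'ctrl' alias at part level too
--     parts = ['control' if p == 'ctrl' else p for p in parts]
--     mods = (['control'] * parts.count('control')
--             + ['shift'] * parts.count('shift')
--             + ['alt'] * parts.count('alt')
--             + ['cmd'] * parts.count('cmd'))
--     keys = [p for p in parts if p not in ('control', 'shift', 'alt', 'cmd')]
--     return '+'.join(mods + keys)
-- ===== Notes on version B (the rewrite author's own statement) =====
-- stated objective: alternative
-- what changed: replaces the partition-into-two-lists loop plus keyed sort of the modifier list by a sort-free bucket count: the four modifiers appear in a fixed order, so B emits each modifier name replicated by its count, then the non-modifier parts in original order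
import Mathlib
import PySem

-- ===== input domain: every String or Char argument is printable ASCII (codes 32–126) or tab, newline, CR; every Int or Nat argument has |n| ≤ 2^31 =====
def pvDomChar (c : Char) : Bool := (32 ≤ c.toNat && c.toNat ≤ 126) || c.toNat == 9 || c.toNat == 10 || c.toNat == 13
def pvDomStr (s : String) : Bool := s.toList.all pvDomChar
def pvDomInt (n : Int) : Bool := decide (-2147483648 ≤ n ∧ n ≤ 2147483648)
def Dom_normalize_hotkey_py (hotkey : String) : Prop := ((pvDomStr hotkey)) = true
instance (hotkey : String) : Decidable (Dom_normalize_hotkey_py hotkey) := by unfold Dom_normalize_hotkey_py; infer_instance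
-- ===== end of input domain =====

-- B replaces the partition-loop + keyed sort of modifiers by a sort-free bucket count (alternative decomposition; return value only).
-- ===== PORT A =====
def normalize_hotkey_py (hotkey : String) : String :=
  let hk1 := PySem.Str.lower hotkey
  let hk2 := PySem.Str.replace hk1 "ctrl" "control"
  let hk3 := PySem.Str.replace hk2 "win" "cmd"
  let parts0 := (PySem.Str.split? hk3 "+").getD []
  let parts := parts0.map PySem.Str.strip
  let mk := parts.foldl (fun (st : List String × List String) part =>
      if (["control", "ctrl", "shift", "alt", "cmd"].contains part) then
        let part := if part = "ctrl" then "control" else part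
        (st.1 ++ [part], st.2)
      else (st.1, st.2 ++ [part])) ([], [])
  let modifier_order : PySem.Dict String Int :=
    PySem.Dict.ofList [("control", 0), ("shift", 1), ("alt", 2), ("cmd", 3)]
  let modifiers := PySem.List.sorted mk.1 (fun x => modifier_order.getD x 99)
  PySem.Str.join "+" (modifiers ++ mk.2)

-- ===== PORT B =====
def normalize_hotkey_py_alt (hotkey : String) : String :=
  let hk := PySem.Str.replace (PySem.Str.replace (PySem.Str.lower hotkey) "ctrl" "control") "win" "cmd"
  let parts1 := ((PySem.Str.split? hk "+").getD []).map PySem.Str.strip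
  let parts := parts1.map (fun p => if p = "ctrl" then "control" else p)
  let mods := PySem.List.pyRepeat ["control"] (PySem.List.count parts "control")
           ++ PySem.List.pyRepeat ["shift"] (PySem.List.count parts "shift")
           ++ PySem.List.pyRepeat ["alt"] (PySem.List.count parts "alt")
           ++ PySem.List.pyRepeat ["cmd"] (PySem.List.count parts "cmd")
  let keys := parts.filter (fun p => !(["control", "shift", "alt", "cmd"].contains p))
  PySem.Str.join "+" (mods ++ keys)

-- ===== PRECONDITION & SPEC =====
def Spec_normalize_hotkey_py (hotkey : String) (out : String) : Prop := out = normalize_hotkey_py_alt hotkey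
instance (hotkey : String) (out : String) : Decidable (Spec_normalize_hotkey_py hotkey out) := by unfold Spec_normalize_hotkey_py; infer_instance

-- ===== CLAIM (what is proved, stated in full; the proofs are below) =====
def Claim_equal_normalize_hotkey_py : Prop := ∀ (hotkey : String), Dom_normalize_hotkey_py hotkey → Spec_normalize_hotkey_py hotkey (normalize_hotkey_py hotkey)


-- ===== LEMMAS AND PROOFS =====

-- abbreviations for the proof
def pvCanon (p : String) : String := if p = "ctrl" then "control" else p

def pvM4 (p : String) : Bool := ["control", "shift", "alt", "cmd"].contains p

def pvKey (p : String) : Int :=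
  (PySem.Dict.ofList [("control", (0:Int)), ("shift", 1), ("alt", 2), ("cmd", 3)]).getD p 99

def pvBefore (a b : String) : Bool := decide (pvKey a < pvKey b)

-- the four replicate buckets B builds, as a function of the modifier multiset
def pvRep (ms : List String) : List String :=
  List.replicate (ms.count "control") "control" ++ List.replicate (ms.count "shift") "shift"
    ++ List.replicate (ms.count "alt") "alt" ++ List.replicate (ms.count "cmd") "cmd"

lemma pvM5_eq_M4_canon (p : String) :
    (["control", "ctrl", "shift", "alt", "cmd"].contains p) = pvM4 (pvCanon p) := by
  by_cases h : p = "ctrl" <;> simp [pvCanon, pvM4, h, List.contains_eq_mem]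

-- A's partition loop, fully characterised
lemma pvFoldA (parts : List String) (ms ks : List String) :
    parts.foldl (fun (st : List String × List String) part =>
      if (["control", "ctrl", "shift", "alt", "cmd"].contains part) then
        let part := if part = "ctrl" then "control" else part
        (st.1 ++ [part], st.2)
      else (st.1, st.2 ++ [part])) (ms, ks)
    = (ms ++ (parts.map pvCanon).filter pvM4,
       ks ++ (parts.map pvCanon).filter (fun p => !(pvM4 p))) := by
  induction parts generalizing ms ks with
  | nil => simp
  | cons p t ih =>
    have hmem := pvM5_eq_M4_canon p
    by_cases h4 : pvM4 (pvCanon p) = true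
    · have hnc : pvCanon p ≠ "ctrl" := by
        intro hc; rw [hc] at h4; simp [pvM4, List.contains_eq_mem] at h4
      simp only [List.foldl_cons, List.map_cons, List.filter_cons, hmem, h4, if_pos,
        Bool.not_true, Bool.false_eq_true, if_false]
      rw [ih]
      simp [pvCanon]
    · have hpc : pvCanon p = p := by
        by_cases hc : p = "ctrl"
        · exfalso; apply h4; rw [hc]; simp [pvCanon, pvM4, List.contains_eq_mem]
        · simp [pvCanon, hc]
      simp only [List.foldl_cons, List.map_cons, List.filter_cons, hmem, h4, if_neg,
        Bool.not_eq_true] at *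
      simp only [Bool.not_false, if_pos, hpc]
      rw [ih]
      simp


-- inserting an element that comes strictly before everything in bs lands inside as
lemma pvInsertBy_append_right (before : String → String → Bool) (x : String)
    (as bs : List String) (h : ∀ y ∈ bs, before x y = true) :
    PySem.List.insertBy before x (as ++ bs) = PySem.List.insertBy before x as ++ bs := by
  induction as with
  | nil =>
    cases bs with
    | nil => simp [PySem.List.insertBy]
    | cons b bs' => simp [PySem.List.insertBy, h b (by simp)]
  | cons a as' ih =>
    by_cases hb : before x a = true <;> simp [PySem.List.insertBy, hb, ih]

-- inserting one of the four modifiers into the bucket list bumps its bucket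
lemma pvInsert_rep (ms : List String) (x : String) (hx : pvM4 x = true) :
    PySem.List.insertBy pvBefore x (pvRep ms) = pvRep (ms ++ [x]) := by
  have hx' : x = "control" ∨ x = "shift" ∨ x = "alt" ∨ x = "cmd" := by
    simp [pvM4, List.contains_eq_mem] at hx; tauto
  have hrep : ∀ (c y : String) (n : Nat), y ∈ List.replicate n c → y = c :=
    fun c y n hy => List.eq_of_mem_replicate hy
  rcases hx' with h | h | h | h <;> subst h <;>
    simp only [pvRep, List.count_append, List.count_cons, List.count_nil, beq_iff_eq,
      List.append_assoc, String.reduceEq, reduceIte, Nat.add_zero, Nat.zero_add]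
  · -- "control"
    rw [pvInsertBy_append_right pvBefore "control" _ _ (by
      intro y hy
      rcases List.mem_append.mp hy with hy | hy
      · rw [hrep _ _ _ hy]; decide
      rcases List.mem_append.mp hy with hy | hy
      · rw [hrep _ _ _ hy]; decide
      · rw [hrep _ _ _ hy]; decide)]
    rw [PySem.List.insertBy_of_forall_not_before pvBefore "control" _ (by
      intro y hy; rw [hrep _ _ _ hy]; decide)]
    try rw [List.replicate_succ']
    try simp [List.append_assoc]
  · -- "shift"
    rw [show ∀ a b c d : List String, a ++ (b ++ (c ++ d)) = (a ++ b) ++ (c ++ d) from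
          fun a b c d => by simp [List.append_assoc]]
    rw [pvInsertBy_append_right pvBefore "shift" _ _ (by
      intro y hy
      rcases List.mem_append.mp hy with hy | hy
      · rw [hrep _ _ _ hy]; decide
      · rw [hrep _ _ _ hy]; decide)]
    rw [PySem.List.insertBy_of_forall_not_before pvBefore "shift" _ (by
      intro y hy
      rcases List.mem_append.mp hy with hy | hy
      · rw [hrep _ _ _ hy]; decide
      · rw [hrep _ _ _ hy]; decide)]
    try rw [List.replicate_succ']
    try simp [List.append_assoc]
  · -- "alt"
    rw [show ∀ a b c d : List String, a ++ (b ++ (c ++ d)) = (a ++ (b ++ c)) ++ d from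
          fun a b c d => by simp [List.append_assoc]]
    rw [pvInsertBy_append_right pvBefore "alt" _ _ (by
      intro y hy; rw [hrep _ _ _ hy]; decide)]
    rw [PySem.List.insertBy_of_forall_not_before pvBefore "alt" _ (by
      intro y hy
      rcases List.mem_append.mp hy with hy | hy
      · rw [hrep _ _ _ hy]; decide
      rcases List.mem_append.mp hy with hy | hy
      · rw [hrep _ _ _ hy]; decide
      · rw [hrep _ _ _ hy]; decide)]
    try rw [List.replicate_succ']
    try simp [List.append_assoc]
  · -- "cmd"
    rw [PySem.List.insertBy_of_forall_not_before pvBefore "cmd" _ (by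
      intro y hy
      rcases List.mem_append.mp hy with hy | hy
      · rw [hrep _ _ _ hy]; decide
      rcases List.mem_append.mp hy with hy | hy
      · rw [hrep _ _ _ hy]; decide
      rcases List.mem_append.mp hy with hy | hy
      · rw [hrep _ _ _ hy]; decide
      · rw [hrep _ _ _ hy]; decide)]
    try rw [List.replicate_succ']
    try simp [List.append_assoc]

-- A's stable keyed sort of a modifier list IS B's bucket list
lemma pvSorted_eq_rep (ms : List String) (h : ∀ x ∈ ms, pvM4 x = true) :
    PySem.List.sorted ms (fun x =>
      (PySem.Dict.ofList [("control", (0:Int)), ("shift", 1), ("alt", 2), ("cmd", 3)]).getD x 99)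
      = pvRep ms := by
  induction ms using List.reverseRecOn with
  | nil => simp [PySem.List.sorted, pvRep]
  | append_singleton t x ih =>
    rw [PySem.List.sorted_eq_foldl_insertBy, List.foldl_append,
        ← PySem.List.sorted_eq_foldl_insertBy]
    rw [ih (fun y hy => h y (List.mem_append_left _ hy))]
    simpa [pvBefore, pvKey] using pvInsert_rep t x (h x (List.mem_append_right _ (by simp)))

-- the whole parts-level equality, for an arbitrary stripped parts list
lemma pvParts_eq (parts1 : List String) :
    PySem.List.sorted
        ((parts1.foldl (fun (st : List String × List String) part =>
            if (["control", "ctrl", "shift", "alt", "cmd"].contains part) then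
              let part := if part = "ctrl" then "control" else part
              (st.1 ++ [part], st.2)
            else (st.1, st.2 ++ [part])) ([], [])).1)
        (fun x =>
          (PySem.Dict.ofList [("control", (0:Int)), ("shift", 1), ("alt", 2), ("cmd", 3)]).getD x 99)
      ++ (parts1.foldl (fun (st : List String × List String) part =>
            if (["control", "ctrl", "shift", "alt", "cmd"].contains part) then
              let part := if part = "ctrl" then "control" else part
              (st.1 ++ [part], st.2)
            else (st.1, st.2 ++ [part])) ([], [])).2
    = (PySem.List.pyRepeat ["control"]
          (PySem.List.count (parts1.map (fun p => if p = "ctrl" then "control" else p)) "control")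
        ++ PySem.List.pyRepeat ["shift"]
          (PySem.List.count (parts1.map (fun p => if p = "ctrl" then "control" else p)) "shift")
        ++ PySem.List.pyRepeat ["alt"]
          (PySem.List.count (parts1.map (fun p => if p = "ctrl" then "control" else p)) "alt")
        ++ PySem.List.pyRepeat ["cmd"]
          (PySem.List.count (parts1.map (fun p => if p = "ctrl" then "control" else p)) "cmd"))
      ++ (parts1.map (fun p => if p = "ctrl" then "control" else p)).filter
          (fun p => !(["control", "shift", "alt", "cmd"].contains p)) := by
  rw [pvFoldA]
  simp only [List.nil_append]
  have hcanon : parts1.map (fun p => if p = "ctrl" then "control" else p) = parts1.map pvCanon := by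
    simp [pvCanon]
  rw [hcanon]
  set cp := parts1.map pvCanon with hcp
  rw [pvSorted_eq_rep (cp.filter pvM4) (fun x hx => List.of_mem_filter hx)]
  have hcount : ∀ m : String, pvM4 m = true →
      PySem.List.count cp m = List.count m (cp.filter pvM4) := by
    intro m hm
    rw [PySem.List.count_eq, List.count_filter hm]
  rw [PySem.List.pyRepeat_singleton, PySem.List.pyRepeat_singleton,
      PySem.List.pyRepeat_singleton, PySem.List.pyRepeat_singleton]
  rw [hcount "control" (by decide), hcount "shift" (by decide),
      hcount "alt" (by decide), hcount "cmd" (by decide)]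
  simp only [Int.toNat_natCast, pvRep, pvM4, List.append_assoc]

-- ===== VERDICT (by name: the statement is the Claim_ definition above) =====
theorem normalize_hotkey_py_spec : Claim_equal_normalize_hotkey_py := by
  intro hotkey _
  unfold Spec_normalize_hotkey_py normalize_hotkey_py normalize_hotkey_py_alt
  exact congrArg (PySem.Str.join "+") (pvParts_eq _)
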